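-- pv_equiv track=rewrite | github.com/Diwash-7/python-learning | normal/wordFrequency.py | bad_word
-- ===== SOURCE A (Python) =====
-- def bad_word(a):
--
--     bad = ['fuck','shit','noob' ]
--     censor = False
--     words = a.split()
--
--     for i in range (len(words)):
--         if words[i].lower() in bad:
--             star = '*'*len(words[i])
--             words[i]=star
--             censor = True
--
--     censored_text = ' '.join(words)
--     # censored_text =  words
--     return censor , censored_text
-- ===== SOURCE B (Python) =====
-- def bad_word(a):
--     bad = ['fuck', 'shit', 'noob']
--     censor = False
--     pieces = []
--     buf = ''
--     for ch in a:
--         if ch.isspace():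
--             if buf:
--                 if buf.lower() in bad:
--                     pieces.append('*' * len(buf))
--                     censor = True
--                 else:
--                     pieces.append(buf)
--                 buf = ''
--         else:
--             buf += ch
--     if buf:
--         if buf.lower() in bad:
--             pieces.append('*' * len(buf))
--             censor = True
--         else:
--             pieces.append(buf)
--     return censor, ' '.join(pieces)
-- ===== Notes on version B (the rewrite author's own statement) =====
-- stated objective: alternative
-- what changed: Replaces A's split-into-a-list plus in-place index loop by one fused character-level scan that tokenizes and censors in a single pass over the string (no split(), no index mutation), flushing each word buffer as it ends.
import Mathlib
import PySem

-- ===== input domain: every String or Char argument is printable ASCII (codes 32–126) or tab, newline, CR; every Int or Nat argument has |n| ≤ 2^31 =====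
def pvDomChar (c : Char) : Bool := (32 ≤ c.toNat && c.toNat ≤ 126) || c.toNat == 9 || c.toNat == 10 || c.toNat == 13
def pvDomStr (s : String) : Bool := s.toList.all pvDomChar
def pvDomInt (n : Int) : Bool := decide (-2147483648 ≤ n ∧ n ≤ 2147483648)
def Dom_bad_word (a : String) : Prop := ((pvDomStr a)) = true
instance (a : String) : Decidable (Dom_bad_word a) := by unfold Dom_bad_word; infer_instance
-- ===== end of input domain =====

-- B replaces A's split-into-a-list plus in-place index loop by one fused character-level
-- scan that tokenizes and censors in a single pass (no split(), no index mutation).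

-- ===== PORT A =====
-- loop body of A's for-loop: read words[i], star it out and set the flag if it is a bad word
def bwStep (bad : List String) (st : Bool × List String) (i : Int) : Bool × List String :=
  let w := PySem.List.pyGetD st.2 i ""
  if bad.contains (PySem.Str.lower w) then
    let star := String.ofList (List.replicate w.toList.length '*')
    (true, PySem.List.pySetD st.2 i star)
  else st

def bad_word (a : String) : Bool × String :=
  let bad : List String := ["fuck", "shit", "noob"]
  let words := PySem.Str.split₀ a
  let st := (PySem.List.pyRange 0 (PySem.List.len words) 1).foldl (bwStep bad) (false, words)
  (st.1, PySem.Str.join " " st.2)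

-- ===== PORT B =====
-- Source B's flush block (run when a word buffer ends, and once at end of string):
-- append the word (starred if bad) to pieces, updating the censor flag
def bwFlush (bad : List String) (censor : Bool) (pieces : List String) (buf : List Char) :
    Bool × List String :=
  if buf.isEmpty then (censor, pieces)
  else
    let w := String.ofList buf
    if bad.contains (PySem.Str.lower w) then
      (true, pieces ++ [String.ofList (List.replicate buf.length '*')])
    else (censor, pieces ++ [w])

-- Source B's character loop: state = (censor, pieces, buf)
def bwScan (bad : List String) : List Char → Bool → List String → List Char → Bool × List String
  | [], censor, pieces, buf => bwFlush bad censor pieces buf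
  | c :: rest, censor, pieces, buf =>
    if PySem.Chars.isspace c then
      if buf.isEmpty then bwScan bad rest censor pieces buf
      else
        let st := bwFlush bad censor pieces buf
        bwScan bad rest st.1 st.2 []
    else bwScan bad rest censor pieces (buf ++ [c])

def bad_word_alt (a : String) : Bool × String :=
  let bad : List String := ["fuck", "shit", "noob"]
  let st := bwScan bad a.toList false [] []
  (st.1, PySem.Str.join " " st.2)

-- ===== PRECONDITION & SPEC =====
def Spec_bad_word (a : String) (out : Bool × String) : Prop := out = bad_word_alt a
instance (a : String) (out : Bool × String) : Decidable (Spec_bad_word a out) := by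
  unfold Spec_bad_word; infer_instance

-- ===== CLAIM =====
def Claim_equal_bad_word : Prop := ∀ (a : String), Dom_bad_word a → Spec_bad_word a (bad_word a)

-- ===== LEMMAS AND PROOFS =====

-- abbreviations over char-list words
def bwBadC (bad : List String) (wc : List Char) : Bool :=
  bad.contains (PySem.Str.lower (String.ofList wc))
def bwProcC (bad : List String) (wc : List Char) : String :=
  if bwBadC bad wc then String.ofList (List.replicate wc.length '*') else String.ofList wc

-- split₀.go's accumulator is just prepended (reversed) to the result
theorem go_acc (rest cur : List Char) (acc : List (List Char)) :
    PySem.Chars.split₀.go rest cur acc = acc.reverse ++ PySem.Chars.split₀.go rest cur [] := by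
  induction rest generalizing cur acc with
  | nil =>
    by_cases h : cur.isEmpty
    · have h' : cur.isEmpty = true := h
      simp [PySem.Chars.split₀.go, h']
    · have h' : cur.isEmpty = false := by simpa using h
      simp [PySem.Chars.split₀.go, h']
  | cons c rest ih =>
    by_cases hs : PySem.Chars.isspace c
    · by_cases h : cur.isEmpty
      · have h' : cur.isEmpty = true := h
        simp only [PySem.Chars.split₀.go, hs, h', if_true]
        exact ih [] acc
      · have h' : cur.isEmpty = false := by simpa using h
        simp only [PySem.Chars.split₀.go, hs, h', if_true, if_false, Bool.false_eq_true]
        rw [ih [] (cur.reverse :: acc), ih [] [cur.reverse]]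
        simp
    · have hs' : PySem.Chars.isspace c = false := by simpa using hs
      simp only [PySem.Chars.split₀.go, hs', Bool.false_eq_true, if_false]
      exact ih (c :: cur) acc

-- Invariant: B's fused scan equals flag-or plus censor-map over the words split₀ would produce
set_option maxRecDepth 4096 in
theorem bwScan_inv (bad : List String) (rest buf : List Char) (censor : Bool)
    (pieces : List String) :
    bwScan bad rest censor pieces buf
      = (censor || (PySem.Chars.split₀.go rest buf.reverse []).any (bwBadC bad),
         pieces ++ (PySem.Chars.split₀.go rest buf.reverse []).map (bwProcC bad)) := by
  induction rest generalizing buf censor pieces with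
  | nil =>
    by_cases h : buf.isEmpty
    · have : buf = [] := List.isEmpty_iff.mp h
      subst this
      simp [bwScan, bwFlush, PySem.Chars.split₀.go]
    · have h' : buf.isEmpty = false := by simpa using h
      have hr : buf.reverse.isEmpty = false := by
        simpa [List.isEmpty_iff] using List.isEmpty_iff.not.mp h
      simp only [bwScan, bwFlush, h', PySem.Chars.split₀.go, hr, Bool.false_eq_true, if_false,
        List.reverse_reverse]
      rw [show (bad.contains (PySem.Str.lower (String.ofList buf))) = bwBadC bad buf from rfl]
      cases hb : bwBadC bad buf <;> simp [bwProcC, hb]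
  | cons c rest ih =>
    by_cases hs : PySem.Chars.isspace c
    · by_cases h : buf.isEmpty
      · have : buf = [] := List.isEmpty_iff.mp h
        subst this
        simp only [bwScan, hs, if_true, List.isEmpty_nil, List.reverse_nil,
          PySem.Chars.split₀.go]
        rw [ih]
        simp
      · have h' : buf.isEmpty = false := by simpa using h
        have hr : buf.reverse.isEmpty = false := by
          simpa [List.isEmpty_iff] using List.isEmpty_iff.not.mp h
        simp only [bwScan, hs, h', if_true, if_false, Bool.false_eq_true, bwFlush,
          PySem.Chars.split₀.go, hr, List.reverse_reverse]
        rw [go_acc rest [] [buf]]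
        rw [show (bad.contains (PySem.Str.lower (String.ofList buf))) = bwBadC bad buf from rfl]
        cases hb : bwBadC bad buf <;> simp [ih, bwProcC, hb]
    · have hs' : PySem.Chars.isspace c = false := by simpa using hs
      simp only [bwScan, hs', Bool.false_eq_true, if_false, PySem.Chars.split₀.go]
      rw [show (c :: buf.reverse) = (buf ++ [c]).reverse by simp]
      exact ih (buf ++ [c]) censor pieces

-- Invariant for A: with the first |done| words processed, A's loop ors the flag over the
-- suffix and maps the suffix word by word.
theorem bwLoop_inv (bad : List String) (ws done : List String) (c : Bool) :
    (PySem.List.pyRange (done.length : Int) ((done.length : Int) + ws.length) 1).foldl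
        (bwStep bad) (c, done ++ ws)
    = (c || ws.any (fun w => bad.contains (PySem.Str.lower w)),
       done ++ ws.map (fun w =>
         if bad.contains (PySem.Str.lower w) then String.ofList (List.replicate w.toList.length '*') else w)) := by
  induction ws generalizing done c with
  | nil => simp [PySem.List.pyRange_one_eq_nil]
  | cons w ws ih =>
    rw [PySem.List.pyRange_one_cons (by push_cast [List.length_cons]; omega)]
    simp only [List.foldl_cons]
    have hget : PySem.List.pyGetD (done ++ w :: ws) (done.length : Int) "" = w := by
      simp [PySem.List.pyGetD_natCast, List.getD_eq_getElem?_getD]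
    have hset : ∀ v, (done ++ w :: ws).set done.length v = done ++ v :: ws := by
      intro v
      rw [List.set_append_right _ _ (le_refl _)]
      simp
    by_cases hb : bad.contains (PySem.Str.lower w)
    · have hstep : bwStep bad (c, done ++ w :: ws) (done.length : Int)
          = (true, (done ++ [String.ofList (List.replicate w.toList.length '*')]) ++ ws) := by
        simp only [bwStep, hget, hb, if_true, PySem.List.pySetD_natCast, hset]
        simp
      rw [hstep]
      have h1 : ((done.length : Int) + 1)
          = (((done ++ [String.ofList (List.replicate w.toList.length '*')]).length : Nat) : Int) := by
        simp
      have h2 : ((done.length : Int) + ((w :: ws).length : Nat))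
          = (((done ++ [String.ofList (List.replicate w.toList.length '*')]).length : Nat) : Int)
            + (ws.length : Nat) := by
        simp [List.length_cons]; ring
      rw [h2, h1, ih]
      have hb' : PySem.Str.lower w ∈ bad := by simpa using hb
      simp [hb']
    · have hstep : bwStep bad (c, done ++ w :: ws) (done.length : Int)
          = (c, (done ++ [w]) ++ ws) := by
        simp only [bwStep, hget, hb, if_false, Bool.false_eq_true]
        simp
      rw [hstep]
      have h1 : ((done.length : Int) + 1) = (((done ++ [w]).length : Nat) : Int) := by simp
      have h2 : ((done.length : Int) + ((w :: ws).length : Nat))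
          = (((done ++ [w]).length : Nat) : Int) + (ws.length : Nat) := by
        simp [List.length_cons]; ring
      rw [h2, h1, ih]
      have hb' : PySem.Str.lower w ∉ bad := by simpa using hb
      simp [hb']

-- ===== VERDICT =====
theorem bad_word_spec : Claim_equal_bad_word := by
  intro a _
  unfold Spec_bad_word bad_word bad_word_alt
  have hA := bwLoop_inv ["fuck", "shit", "noob"] (PySem.Str.split₀ a) [] false
  simp only [List.length_nil, Nat.cast_zero, List.nil_append, zero_add, Bool.false_or] at hA
  have hB := bwScan_inv ["fuck", "shit", "noob"] a.toList [] false []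
  simp only [List.reverse_nil, Bool.false_or, List.nil_append] at hB
  simp only [PySem.List.len_eq]
  rw [hA, hB]
  have hsplit : PySem.Str.split₀ a
      = (PySem.Chars.split₀.go a.toList [] []).map String.ofList := rfl
  rw [hsplit]
  simp only [List.any_map, List.map_map]
  have e1 : ((fun w => (["fuck", "shit", "noob"] : List String).contains (PySem.Str.lower w))
      ∘ String.ofList) = bwBadC ["fuck", "shit", "noob"] := funext fun wc => rfl
  have e2 : ((fun w => if (["fuck", "shit", "noob"] : List String).contains (PySem.Str.lower w) = true
        then String.ofList (List.replicate w.toList.length '*') else w) ∘ String.ofList)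
      = bwProcC ["fuck", "shit", "noob"] := by
    funext wc
    simp [bwProcC, bwBadC, Function.comp]
  rw [e1, e2]
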